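-- pv_equiv track=rewrite | github.com/kotarot/drf-bot | bot/drfbot.py | correctify_corners
-- ===== SOURCE A (Python) =====
-- def correctify_corners(tokens):
--     corrects = {
--         "URF": "UFR", "UFL": "ULF", "ULB": "UBL", "UBR": "URB",
--         "FRD": "FDR", "FDL": "FLD", "FLU": "FUL", "FUR": "FRU",
--         "LFD": "LDF", "LDB": "LBD", "LBU": "LUB", "LUF": "LFU",
--         "BLD": "BDL", "BDR": "BRD", "BRU": "BUR", "BUL": "BLU",
--         "RBD": "RDB", "RDF": "RFD", "RFU": "RUF", "RUB": "RBU",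
--         "DRB": "DBR", "DBL": "DLB", "DLF": "DFL", "DFR": "DRF"
--     }
--
--     ret = []
--     for token in tokens:
--         if token in corrects:
--             ret.append(corrects[token])
--         else:
--             ret.append(token)
--     return ret
-- ===== SOURCE B (Python) =====
-- # Geometric chirality test instead of a 24-entry lookup table: a token is a
-- # mislabeled corner exactly when its three face letters' normal vectors form a
-- # NEGATIVELY oriented (left-handed) frame, and the fix is swapping the last two.
-- def _vec(ch):
--     if ch == "R": return (1, 0, 0)
--     if ch == "L": return (-1, 0, 0)
--     if ch == "U": return (0, 1, 0)
--     if ch == "D": return (0, -1, 0)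
--     if ch == "F": return (0, 0, 1)
--     if ch == "B": return (0, 0, -1)
--     return None
--
-- def _det(a, b, c):
--     return (a[0] * (b[1] * c[2] - b[2] * c[1])
--             - a[1] * (b[0] * c[2] - b[2] * c[0])
--             + a[2] * (b[0] * c[1] - b[1] * c[0]))
--
-- def _fix(t):
--     if len(t) == 3:
--         va, vb, vc = _vec(t[0]), _vec(t[1]), _vec(t[2])
--         if va and vb and vc and _det(va, vb, vc) == -1:
--             return t[0] + t[2] + t[1]
--     return t
--
-- def correctify_corners(tokens):
--     out = []
--     for t in tokens:
--         out.append(_fix(t))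
--     return out
-- ===== Notes on version B (the rewrite author's own statement) =====
-- stated objective: alternative
-- what changed: Replaces the hard-coded 24-entry token lookup table with a geometric test: map each face letter to its unit normal vector and detect mislabeled corner tokens as exactly the 3-letter face triples whose vectors form a negatively oriented frame (determinant -1), fixing them by swapping the last two letters.
import Mathlib
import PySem

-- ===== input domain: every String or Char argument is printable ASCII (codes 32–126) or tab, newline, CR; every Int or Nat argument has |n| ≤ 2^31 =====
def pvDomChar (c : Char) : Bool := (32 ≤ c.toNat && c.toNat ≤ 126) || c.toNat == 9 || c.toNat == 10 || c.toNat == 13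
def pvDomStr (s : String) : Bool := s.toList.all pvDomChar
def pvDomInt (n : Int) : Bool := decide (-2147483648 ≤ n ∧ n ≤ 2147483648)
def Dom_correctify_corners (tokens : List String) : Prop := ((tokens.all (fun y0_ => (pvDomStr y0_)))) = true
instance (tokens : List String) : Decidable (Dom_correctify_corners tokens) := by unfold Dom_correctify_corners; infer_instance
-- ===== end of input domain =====

-- B detects mislabeled corner tokens geometrically (face-normal vectors forming a
-- left-handed frame, det = -1) and swaps the last two letters, instead of A's
-- hard-coded 24-entry lookup table (alternative algorithm, same cost).

-- ===== PORT A =====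
-- the dict literal 'corrects'
def pvCorrects : PySem.Dict String String := PySem.Dict.ofList [
  ("URF", "UFR"), ("UFL", "ULF"), ("ULB", "UBL"), ("UBR", "URB"),
  ("FRD", "FDR"), ("FDL", "FLD"), ("FLU", "FUL"), ("FUR", "FRU"),
  ("LFD", "LDF"), ("LDB", "LBD"), ("LBU", "LUB"), ("LUF", "LFU"),
  ("BLD", "BDL"), ("BDR", "BRD"), ("BRU", "BUR"), ("BUL", "BLU"),
  ("RBD", "RDB"), ("RDF", "RFD"), ("RFU", "RUF"), ("RUB", "RBU"),
  ("DRB", "DBR"), ("DBL", "DLB"), ("DLF", "DFL"), ("DFR", "DRF")]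

def correctify_corners (tokens : List String) : List String :=
  -- ret = []; for token in tokens: …
  tokens.foldl (fun ret token =>
    if pvCorrects.contains token then
      -- corrects[token]: inside this branch the key is present, so getD never uses the default
      ret ++ [pvCorrects.getD token ""]
    else
      ret ++ [token]) []

-- ===== PORT B =====
-- _vec(ch): unit normal of a face letter, None otherwise
def pvVec? (ch : Char) : Option (Int × Int × Int) :=
  if ch = 'R' then some (1, 0, 0)
  else if ch = 'L' then some (-1, 0, 0)
  else if ch = 'U' then some (0, 1, 0)
  else if ch = 'D' then some (0, -1, 0)
  else if ch = 'F' then some (0, 0, 1)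
  else if ch = 'B' then some (0, 0, -1)
  else none

-- _det(a, b, c): 3x3 determinant of the three vectors
def pvDet (a b c : Int × Int × Int) : Int :=
  a.1 * (b.2.1 * c.2.2 - b.2.2 * c.2.1)
    - a.2.1 * (b.1 * c.2.2 - b.2.2 * c.1)
    + a.2.2 * (b.1 * c.2.1 - b.2.1 * c.1)

-- _fix(t): if len(t) == 3 and all three are face letters and det == -1, swap last two
def pvFix (t : String) : String :=
  match t.toList with
  | [a, b, c] =>
    match pvVec? a, pvVec? b, pvVec? c with
    | some va, some vb, some vc =>
      if pvDet va vb vc = -1 then String.ofList [a, c, b] else t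
    | _, _, _ => t
  | _ => t

def correctify_corners_alt (tokens : List String) : List String :=
  -- out = []; for t in tokens: out.append(_fix(t))
  tokens.foldl (fun out t => out ++ [pvFix t]) []

-- ===== PRECONDITION & SPEC =====
def Spec_correctify_corners (tokens : List String) (out : List String) : Prop := out = correctify_corners_alt tokens
instance (tokens : List String) (out : List String) : Decidable (Spec_correctify_corners tokens out) := by unfold Spec_correctify_corners; infer_instance

-- ===== CLAIM (what is proved, stated in full; the proofs are below) =====
def Claim_equal_correctify_corners : Prop := ∀ (tokens : List String), Dom_correctify_corners tokens → Spec_correctify_corners tokens (correctify_corners tokens)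

-- ===== LEMMAS AND PROOFS =====

-- the 24 keys of A's table
def pvKeys : List String := [
  "URF", "UFL", "ULB", "UBR", "FRD", "FDL", "FLU", "FUR",
  "LFD", "LDB", "LBU", "LUF", "BLD", "BDR", "BRU", "BUL",
  "RBD", "RDF", "RFU", "RUB", "DRB", "DBL", "DLF", "DFR"]

theorem pv_keys_eq : pvCorrects.keys = pvKeys := by decide

-- a face letter (one whose pvVec? is some) is one of the six literals
theorem pv_vec_char {ch : Char} {v : Int × Int × Int} (h : pvVec? ch = some v) :
    ch = 'R' ∨ ch = 'L' ∨ ch = 'U' ∨ ch = 'D' ∨ ch = 'F' ∨ ch = 'B' := by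
  unfold pvVec? at h
  split_ifs at h <;> tauto

-- over the six face letters, det = -1 happens exactly on A's 24 keys
theorem pv_det_mem :
    ∀ a ∈ ['R','L','U','D','F','B'], ∀ b ∈ ['R','L','U','D','F','B'],
      ∀ c ∈ ['R','L','U','D','F','B'],
      pvDet ((pvVec? a).getD (0,0,0)) ((pvVec? b).getD (0,0,0)) ((pvVec? c).getD (0,0,0)) = -1 →
      String.ofList [a, b, c] ∈ pvKeys := by
  intro a ha b hb c hc
  fin_cases ha <;> fin_cases hb <;> fin_cases hc <;> decide

-- the two per-token steps agree
theorem pv_step_eq (s : String) :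
    (if pvCorrects.contains s then pvCorrects.getD s "" else s) = pvFix s := by
  by_cases hk : s ∈ pvKeys
  · fin_cases hk <;> decide
  · have hd : pvCorrects.contains s = false := by
      rw [PySem.Dict.contains_eq_decide_mem_keys, pv_keys_eq]
      simpa using hk
    simp only [hd, Bool.false_eq_true, if_false]
    unfold pvFix
    have hs : String.ofList s.toList = s := by
      simp [String.ofList]
    rcases ht : s.toList with _ | ⟨a, _ | ⟨b, _ | ⟨c, _ | _⟩⟩⟩ <;> try rfl
    rcases hva : pvVec? a with _ | va <;>
      rcases hvb : pvVec? b with _ | vb <;>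
        rcases hvc : pvVec? c with _ | vc <;>
          simp only [hva, hvb, hvc] <;> try rfl
    split_ifs with hdet
    · exfalso
      apply hk
      have hmem := pv_det_mem a (by rcases pv_vec_char hva with h|h|h|h|h|h <;> simp [h])
        b (by rcases pv_vec_char hvb with h|h|h|h|h|h <;> simp [h])
        c (by rcases pv_vec_char hvc with h|h|h|h|h|h <;> simp [h])
        (by rw [hva, hvb, hvc]; exact hdet)
      rwa [← ht, hs] at hmem
    · rfl

-- ===== VERDICT (by name: the statement is the Claim_ definition above) =====
theorem correctify_corners_spec : Claim_equal_correctify_corners := by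
  intro tokens _
  unfold Spec_correctify_corners correctify_corners correctify_corners_alt
  have hfun : (fun (ret : List String) token =>
      if pvCorrects.contains token then ret ++ [pvCorrects.getD token ""] else ret ++ [token])
      = fun ret token => ret ++ [if pvCorrects.contains token then pvCorrects.getD token "" else token] := by
    funext ret token; split <;> rfl
  rw [hfun,
    PySem.List.foldl_append_singleton_eq_map
      (f := fun t => if pvCorrects.contains t then pvCorrects.getD t "" else t) (l := tokens) [],
    PySem.List.foldl_append_singleton_eq_map (f := pvFix) (l := tokens) [],
    List.nil_append, List.nil_append]
  exact List.map_congr_left (fun x _ => pv_step_eq x)
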